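-- pv_equiv track=rewrite | github.com/ufal/legros-paper | intrinsic-segmentation-eval/collect_test_segmentations.py | segmentation_from_indices
-- ===== SOURCE A (Python) =====
-- def segmentation_from_indices(word, indices):
--     prev_start = 0
--     segments = []
--     for i, char in enumerate(word):
--         if i in indices:
--             if i in indices:
--                 segments.append(word[prev_start:i])
--                 prev_start = i
--     segments.append(word[prev_start:])
--     return segments
-- ===== SOURCE B (Python) =====
-- def segmentation_from_indices(word, indices):
--     cuts = [0] + sorted(set(i for i in indices if 0 <= i < len(word))) + [len(word)]
--     return [word[a:b] for a, b in zip(cuts, cuts[1:])]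
-- ===== Notes on version B (the rewrite author's own statement) =====
-- stated objective: idiomatic
-- what changed: Instead of scanning every character position and testing membership in indices, B builds the sorted deduplicated list of in-range cut points once and slices the word between consecutive cut points.
import Mathlib
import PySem

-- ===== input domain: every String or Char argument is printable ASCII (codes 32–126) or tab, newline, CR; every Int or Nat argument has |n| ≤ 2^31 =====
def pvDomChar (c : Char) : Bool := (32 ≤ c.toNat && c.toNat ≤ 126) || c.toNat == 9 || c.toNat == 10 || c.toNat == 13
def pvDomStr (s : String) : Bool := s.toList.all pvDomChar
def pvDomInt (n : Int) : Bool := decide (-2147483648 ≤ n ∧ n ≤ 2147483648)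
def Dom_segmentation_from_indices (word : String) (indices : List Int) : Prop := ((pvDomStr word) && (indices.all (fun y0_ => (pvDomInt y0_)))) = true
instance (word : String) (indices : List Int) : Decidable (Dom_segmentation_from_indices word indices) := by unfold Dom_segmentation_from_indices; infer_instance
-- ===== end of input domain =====

-- B replaces A's per-character scan with membership test by a sorted-deduplicated-cut-points
-- decomposition (more idiomatic); return values proved equal on all inputs.

-- ===== PORT A =====
-- for i, char in enumerate(word): if i in indices: if i in indices: append word[prev:i]; prev = i
-- then append word[prev:].  State of the loop: (prev_start, segments).
def segmentation_from_indices (word : String) (indices : List Int) : List String :=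
  let st := (PySem.List.enumerate word.toList 0).foldl
    (fun (s : Int × List String) p =>
      if p.1 ∈ indices then
        (if p.1 ∈ indices then (p.1, s.2 ++ [PySem.Str.slice word (some s.1) (some p.1)]) else s)
      else s)
    ((0 : Int), ([] : List String))
  st.2 ++ [PySem.Str.slice word (some st.1) none]

-- ===== PORT B =====
-- cuts = [0] + sorted(set(i for i in indices if 0 <= i < len(word))) + [len(word)]
-- return [word[a:b] for a, b in zip(cuts, cuts[1:])]   (cuts[1:] = cuts.tail)
def segmentation_from_indices_alt (word : String) (indices : List Int) : List String :=
  let cuts : List Int :=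
    [0] ++ PySem.List.sorted
      (PySem.Set.ofList (indices.filter (fun i => decide (0 ≤ i ∧ i < PySem.Str.len word))))
      (fun x => x) ++ [PySem.Str.len word]
  (cuts.zip cuts.tail).map (fun p => PySem.Str.slice word (some p.1) (some p.2))

-- ===== PRECONDITION & SPEC =====
def Spec_segmentation_from_indices (word : String) (indices : List Int) (out : List String) : Prop := out = segmentation_from_indices_alt word indices
instance (word : String) (indices : List Int) (out : List String) : Decidable (Spec_segmentation_from_indices word indices out) := by unfold Spec_segmentation_from_indices; infer_instance

-- ===== CLAIM (what is proved, stated in full; the proofs are below) =====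
def Claim_equal_segmentation_from_indices : Prop := ∀ (word : String) (indices : List Int), Dom_segmentation_from_indices word indices → Spec_segmentation_from_indices word indices (segmentation_from_indices word indices)

-- ===== LEMMAS AND PROOFS =====

-- word[a:] = word[a:len(word)] for a non-negative start (slicing clamps past the end).
lemma slice_full (w : String) (a : Int) (ha : 0 ≤ a) :
    PySem.Str.slice w (some a) none = PySem.Str.slice w (some a) (some (w.toList.length : Int)) := by
  unfold PySem.Str.slice
  congr 1
  simp only [PySem.Chars.slice_eq_listSlice]
  rw [PySem.List.slice_from _ ha, PySem.List.slice_toNat _ ha (by positivity)]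
  rw [List.take_of_length_le (by simp)]

-- Core: folding the "cut here" update over any list of non-negative cut points, then closing
-- with the tail slice, equals the pairwise-slice map over prev :: L ++ [len].
lemma core (w : String) (L : List Int) : ∀ (prev : Int) (acc : List String), 0 ≤ prev →
    (∀ x ∈ L, 0 ≤ x) →
    (let st := L.foldl
        (fun (s : Int × List String) i => (i, s.2 ++ [PySem.Str.slice w (some s.1) (some i)]))
        (prev, acc)
     st.2 ++ [PySem.Str.slice w (some st.1) none])
    = acc ++ ((prev :: (L ++ [(w.toList.length : Int)])).zip
        (L ++ [(w.toList.length : Int)])).map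
        (fun p => PySem.Str.slice w (some p.1) (some p.2)) := by
  induction L with
  | nil =>
    intro prev acc hprev _
    simp [List.zip, slice_full w prev hprev]
  | cons a L ih =>
    intro prev acc hprev hL
    have ha : 0 ≤ a := hL a (by simp)
    have := ih a (acc ++ [PySem.Str.slice w (some prev) (some a)]) ha
      (fun x hx => hL x (by simp [hx]))
    simp only [List.foldl_cons]
    rw [this]
    cases L <;> simp

-- the strictly increasing list of fired positions: members and order
lemma filter_eq_sorted (w : String) (indices : List Int) :
    PySem.List.sorted
      (PySem.Set.ofList (indices.filter (fun i => decide (0 ≤ i ∧ i < (w.toList.length : Int)))))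
      (fun x => x)
    = (PySem.List.pyRange 0 (w.toList.length : Int)).filter (fun i => decide (i ∈ indices)) := by
  apply PySem.List.sorted_eq_of_perm_of_pairwise_lt
  · rw [List.perm_ext_iff_of_nodup]
    · intro a
      simp only [List.mem_filter, PySem.Set.mem_ofList, PySem.List.mem_pyRange_one,
        decide_eq_true_eq]
      tauto
    · exact ((PySem.List.pairwise_lt_pyRange_one 0 _).filter _).nodup
    · exact PySem.Set.nodup_ofList _
  · exact (PySem.List.pairwise_lt_pyRange_one 0 _).filter _

-- ===== VERDICT (by name: the statement is the Claim_ definition above) =====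
theorem segmentation_from_indices_spec : Claim_equal_segmentation_from_indices := by
  intro word indices _
  unfold Spec_segmentation_from_indices segmentation_from_indices segmentation_from_indices_alt
  -- A's loop state depends only on the index component of enumerate
  rw [show (PySem.List.enumerate word.toList 0).foldl
      (fun (s : Int × List String) p =>
        if p.1 ∈ indices then
          (if p.1 ∈ indices then (p.1, s.2 ++ [PySem.Str.slice word (some s.1) (some p.1)]) else s)
        else s)
      ((0 : Int), ([] : List String))
    = ((PySem.List.enumerate word.toList 0).map (fun p => p.1)).foldl
      (fun (s : Int × List String) i =>
        if i ∈ indices then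
          (if i ∈ indices then (i, s.2 ++ [PySem.Str.slice word (some s.1) (some i)]) else s)
        else s)
      ((0 : Int), ([] : List String)) from (List.foldl_map (f := fun (p : Int × Char) => p.1)
      (g := fun (s : Int × List String) i =>
        if i ∈ indices then
          (if i ∈ indices then (i, s.2 ++ [PySem.Str.slice word (some s.1) (some i)]) else s)
        else s)).symm]
  rw [PySem.List.map_fst_enumerate, zero_add]
  -- collapse the nested if and push the fold through filter
  rw [PySem.List.foldl_congr_mem _ _
      (fun (s : Int × List String) i =>
        if decide (i ∈ indices) = true then (i, s.2 ++ [PySem.Str.slice word (some s.1) (some i)]) else s)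
      _ (by intro acc x _; by_cases h : x ∈ indices <;> simp [h])]
  rw [← List.foldl_filter]
  rw [← filter_eq_sorted word indices]
  -- now both sides speak about the same sorted cut list; apply the core lemma
  have h := core word
    (PySem.List.sorted
      (PySem.Set.ofList (indices.filter (fun i => decide (0 ≤ i ∧ i < (word.toList.length : Int)))))
      (fun x => x))
    0 [] le_rfl
    (by
      intro x hx
      rw [PySem.List.mem_sorted, PySem.Set.mem_ofList, List.mem_filter] at hx
      exact of_decide_eq_true hx.2 |>.1)
  simp only [PySem.Str.len_eq]
  simp only at h
  rw [h]
  simp only [List.nil_append]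
  rfl
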